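-- pv_equiv track=rewrite | github.com/geekynerdbiker/outsourcing | Done/python-workspace/python-algs/assignments.py | zapbook
-- ===== SOURCE A (Python) =====
-- def zapbook(n):
--     if n == 1:
--         return [1]
--     if n % 2 == 1:
--         return []
--
--     idx, step = 0, 0
--     arr = [0 for _ in range(n)]
--     if n & (n - 1) == 0:
--         while arr.count(0) != 0:
--             arr[step] = idx + 1
--             step += arr[step]
--             idx += 1
--             step %= n
--         return arr
--     else:
--         return [n - 1 - i * 2 for i in range(n // 2)] + [n - i * 2 for i in range(n // 2)]
-- ===== SOURCE B (Python) =====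
-- def zapbook(n):
--     if n == 1:
--         return [1]
--     if n % 2 == 1:
--         return []
--     if n > 0 and n & (n - 1) == 0:
--         # Closed form: the k-th placement lands at triangular(k) mod n, and those
--         # positions are pairwise distinct mod a power of two, so one dict built
--         # from the closed-form positions replaces the whole stepping simulation.
--         pos = {i * (i + 1) // 2 % n: i + 1 for i in range(n)}
--         return [pos[j] for j in range(n)]
--     return list(range(n - 1, 0, -2)) + list(range(n, 0, -2))
-- ===== Notes on version B (the rewrite author's own statement) =====
-- stated objective: faster
-- what changed: Instead of simulating A's stepping loop on a mutable array (rescanning it with arr.count(0) each turn), B computes every placement position in closed form as triangular(i) mod n, builds a position-to-value dict in one comprehension, and emits the array by indexed lookup; the non-power-of-two branch uses two range() calls instead of comprehensions.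
import Mathlib
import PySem

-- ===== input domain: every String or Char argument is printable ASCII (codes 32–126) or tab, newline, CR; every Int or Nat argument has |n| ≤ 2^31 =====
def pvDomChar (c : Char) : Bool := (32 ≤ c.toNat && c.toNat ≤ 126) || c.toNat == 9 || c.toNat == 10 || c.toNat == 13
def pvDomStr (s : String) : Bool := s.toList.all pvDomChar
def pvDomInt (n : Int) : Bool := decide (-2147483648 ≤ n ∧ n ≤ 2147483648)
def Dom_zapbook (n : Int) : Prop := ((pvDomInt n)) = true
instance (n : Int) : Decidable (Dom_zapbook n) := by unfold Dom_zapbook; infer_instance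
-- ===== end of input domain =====

-- B replaces A's O(n^2) stepping simulation (arr.count(0) rescans each turn) by the closed
-- form position triangular(i) mod n: a dict from positions to values, read out by index.


-- ===== PORT A =====
-- the while loop, with fuel n.toNat: on every input where the Python loop is reached and
-- terminates (n a positive power of two) it runs exactly n iterations, so the fuel is exact
def zapLoopA (n : Int) : Nat → List Int → Int → Int → List Int
  | 0, arr, _, _ => arr
  | f + 1, arr, idx, step =>
    if arr.count 0 ≠ 0 then
      let arr' := arr.set step.toNat (idx + 1)       -- arr[step] = idx + 1   (0 ≤ step < n here)
      let step' := step + arr'.getD step.toNat 0     -- step += arr[step]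
      zapLoopA n f arr' (idx + 1) (PySem.Int.mod step' n)   -- idx += 1; step %= n
    else arr

def zapbook (n : Int) : List Int :=
  if n = 1 then [1]
  else if PySem.Int.mod n 2 = 1 then []
  else if PySem.Int.band n (n - 1) = 0 then
    zapLoopA n n.toNat (List.replicate n.toNat 0) 0 0
  else
    (PySem.List.pyRange 0 (PySem.Int.floordiv n 2) 1).map (fun i => n - 1 - i * 2)
      ++ (PySem.List.pyRange 0 (PySem.Int.floordiv n 2) 1).map (fun i => n - i * 2)

-- ===== PORT B =====
def zapbook_alt (n : Int) : List Int :=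
  if n = 1 then [1]
  else if PySem.Int.mod n 2 = 1 then []
  else if 0 < n ∧ PySem.Int.band n (n - 1) = 0 then
    -- pos = {i*(i+1)//2 % n: i+1 for i in range(n)}
    let pos : PySem.Dict Int Int :=
      (PySem.List.pyRange 0 n 1).foldl
        (fun d i => d.insert (PySem.Int.mod (PySem.Int.floordiv (i * (i + 1)) 2) n) (i + 1))
        PySem.Dict.empty
    -- [pos[j] for j in range(n)]  -- the key is always present (proved below), so the
    -- getD default is never read; Python's pos[j] raises only on a missing key
    (PySem.List.pyRange 0 n 1).map (fun j => (pos.get? j).getD 0)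
  else
    PySem.List.pyRange (n - 1) 0 (-2) ++ PySem.List.pyRange n 0 (-2)

-- ===== PRECONDITION & SPEC =====
def Spec_zapbook (n : Int) (out : List Int) : Prop := out = zapbook_alt n
instance (n : Int) (out : List Int) : Decidable (Spec_zapbook n out) := by unfold Spec_zapbook; infer_instance

-- ===== CLAIM (what is proved, stated in full; the proofs are below) =====
def Claim_equal_zapbook : Prop := ∀ (n : Int), Dom_zapbook n → Spec_zapbook n (zapbook n)

-- ===== LEMMAS AND PROOFS =====

-- triangular numbers: pvT i = 0 + 1 + ... + i
def pvT : Nat → Nat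
  | 0 => 0
  | i + 1 => pvT i + i + 1

-- the running step position mod m (= pvT i % m, proved below)
def pvS (m : Nat) : Nat → Nat
  | 0 => 0
  | i + 1 => (pvS m i + i + 1) % m

-- A's state trajectory: (array, step) after i placements
def pvTraj (n : Int) : Nat → List Int × Int
  | 0 => (List.replicate n.toNat 0, 0)
  | i + 1 =>
      ((pvTraj n i).1.set (pvTraj n i).2.toNat ((i : Int) + 1),
        PySem.Int.mod ((pvTraj n i).2 + (i : Int) + 1) n)

-- B's dict after i insertions
def pvDict (n : Int) (i : Nat) : PySem.Dict Int Int :=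
  (PySem.List.pyRange 0 (i : Int) 1).foldl
    (fun d i => d.insert (PySem.Int.mod (PySem.Int.floordiv (i * (i + 1)) 2) n) (i + 1))
    PySem.Dict.empty

lemma pvT_two (i : Nat) : 2 * pvT i = i * (i + 1) := by
  induction i with
  | zero => rfl
  | succ i ih => simp only [pvT]; nlinarith [ih]

lemma pvT_mono {l i : Nat} (h : l ≤ i) : pvT l ≤ pvT i := by
  induction i with
  | zero => simp [Nat.le_zero.mp h]
  | succ i ih =>
    rcases Nat.lt_or_ge l (i + 1) with h' | h'
    · have := ih (by omega); simp only [pvT]; omega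
    · have : l = i + 1 := by omega
      simp [this]

lemma pvS_eq (m i : Nat) : pvS m i = pvT i % m := by
  induction i with
  | zero => simp [pvS, pvT]
  | succ i ih =>
    show (pvS m i + i + 1) % m = (pvT i + i + 1) % m
    rw [ih]
    have h : (pvT i % m + (i + 1)) % m = (pvT i + (i + 1)) % m :=
      (Nat.mod_modEq (pvT i) m).add_right (i + 1)
    simp [← Nat.add_assoc] at h
    exact h

lemma pvS_lt (m i : Nat) (hm : 0 < m) : pvS m i < m := by
  cases i with
  | zero => simpa [pvS] using hm
  | succ i => exact Nat.mod_lt _ hm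

-- distinctness of triangular numbers mod 2^k: the heart of the equivalence
lemma pvS_inj (k l i : Nat) (hl : l < i) (hi : i < 2 ^ k) :
    pvS (2 ^ k) l ≠ pvS (2 ^ k) i := by
  intro h
  rw [pvS_eq, pvS_eq] at h
  have hle : pvT l ≤ pvT i := pvT_mono (by omega)
  obtain ⟨c, hc⟩ := (Nat.modEq_iff_dvd' hle).mp h
  have hTi : pvT i = pvT l + 2 ^ k * c := by omega
  have hkey : (i - l) * (i + l + 1) = 2 ^ (k + 1) * c := by
    have h2i := pvT_two i
    have h2l := pvT_two l
    have hll : l ≤ i := by omega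
    zify [hll]
    have h2i' : (2 : Int) * pvT i = i * (i + 1) := by exact_mod_cast h2i
    have h2l' : (2 : Int) * pvT l = l * (l + 1) := by exact_mod_cast h2l
    have hTi' : (pvT i : Int) = pvT l + 2 ^ k * c := by exact_mod_cast hTi
    push_cast [pow_succ]
    linear_combination (-1) * h2i' + h2l' + 2 * hTi'
  rcases Nat.even_or_odd (i - l) with hev | hod
  · have hodd : ¬ 2 ∣ (i + l + 1) := by
      rcases hev with ⟨t, ht⟩; omega
    have hco : Nat.Coprime (2 ^ (k + 1)) (i + l + 1) :=
      Nat.Coprime.pow_left _ (Nat.prime_two.coprime_iff_not_dvd.mpr hodd)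
    have hdvd : 2 ^ (k + 1) ∣ (i - l) * (i + l + 1) := ⟨c, hkey⟩
    have := Nat.le_of_dvd (by omega) (hco.dvd_of_dvd_mul_right hdvd)
    have : 2 ^ k < 2 ^ (k + 1) := Nat.pow_lt_pow_right (by omega) (by omega)
    omega
  · have hod' : ¬ 2 ∣ (i - l) := by
      rcases hod with ⟨t, ht⟩; omega
    have hco : Nat.Coprime (2 ^ (k + 1)) (i - l) :=
      Nat.Coprime.pow_left _ (Nat.prime_two.coprime_iff_not_dvd.mpr hod')
    have hdvd : 2 ^ (k + 1) ∣ (i - l) * (i + l + 1) := ⟨c, hkey⟩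
    have := Nat.le_of_dvd (by omega) (hco.dvd_of_dvd_mul_left hdvd)
    have : 2 ^ (k + 1) = 2 * 2 ^ k := by ring
    omega

-- pvS is a bijection on [0, 2^k): surjectivity, from injectivity on a finite type
lemma pvS_surj (k : Nat) (j : Nat) (hj : j < 2 ^ k) :
    ∃ l, l < 2 ^ k ∧ pvS (2 ^ k) l = j := by
  have hpos := Nat.two_pow_pos k
  let f : Fin (2 ^ k) → Fin (2 ^ k) := fun i => ⟨pvS (2 ^ k) i, pvS_lt _ _ hpos⟩
  have hinj : Function.Injective f := by
    intro a b hab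
    by_contra hne
    have hv : (f a).val = (f b).val := congrArg Fin.val hab
    rcases Nat.lt_or_ge a.val b.val with h | h
    · exact pvS_inj k a.val b.val h b.isLt hv
    · have : b.val < a.val := by
        have := Fin.val_ne_of_ne hne; omega
      exact pvS_inj k b.val a.val this a.isLt hv.symm
  obtain ⟨i, hi⟩ := (Finite.injective_iff_surjective.mp hinj) ⟨j, hj⟩
  exact ⟨i.val, i.isLt, congrArg Fin.val hi⟩

-- m & (m-1) == 0 characterizes powers of two among positive m
lemma pvPow_of_land (m : Nat) (hm : 0 < m) (h : m &&& (m - 1) = 0) : ∃ k, m = 2 ^ k := by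
  induction m using Nat.strong_induction_on with
  | _ m ih =>
    have hbit : ∀ i, m.testBit i = true → (m - 1).testBit i = false := by
      intro i
      have := congrArg (fun x => Nat.testBit x i) h
      simpa [Nat.testBit_and] using this
    rcases Nat.even_or_odd m with hev | hod
    · obtain ⟨a, ha⟩ := hev
      have ha2 : m = 2 * a := by omega
      have ha0 : 0 < a := by omega
      have hbit' : ∀ i, a.testBit i = true → (a - 1).testBit i = false := by
        intro i
        have h1 : a.testBit i = m.testBit (i + 1) := by
          rw [Nat.testBit_add_one, ha2, Nat.mul_div_cancel_left _ (by omega : 0 < 2)]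
        have h2 : (a - 1).testBit i = (m - 1).testBit (i + 1) := by
          rw [Nat.testBit_add_one]
          congr 1
          omega
        rw [h1, h2]; exact hbit (i + 1)
      have ha' : a &&& (a - 1) = 0 := by
        apply Nat.eq_of_testBit_eq
        intro i
        rw [Nat.testBit_and, Nat.zero_testBit]
        cases hh : a.testBit i with
        | false => simp
        | true => simp [hbit' i hh]
      obtain ⟨k, hk⟩ := ih a (by omega) ha0 ha'
      exact ⟨k + 1, by rw [ha2, hk]; ring⟩
    · rcases Nat.lt_or_ge m 2 with h1 | h1
      · exact ⟨0, by omega⟩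
      · exfalso
        have hm2 : 0 < m / 2 := by omega
        obtain ⟨j, hj⟩ : ∃ j, (m / 2).testBit j = true := by
          by_contra hall
          push Not at hall
          have : m / 2 = 0 := Nat.eq_of_testBit_eq (by intro i; simp [hall i])
          omega
        have hb1 : m.testBit (j + 1) = true := by rw [Nat.testBit_add_one]; exact hj
        have hb2 : (m - 1).testBit (j + 1) = true := by
          rw [Nat.testBit_add_one]
          obtain ⟨t, ht⟩ := hod
          have : (m - 1) / 2 = m / 2 := by omega
          rw [this]; exact hj
        have := hbit (j + 1) hb1
        rw [hb2] at this
        simp at this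

-- Python's a & b is negative when both arguments are negative
lemma pvBand_neg_neg (a b : Int) (ha : a < 0) (hb : b < 0) : PySem.Int.band a b < 0 := by
  unfold PySem.Int.band
  split_ifs with h1 h2 h2 <;> omega

-- getD after set
lemma pvGetD_set (l : List Int) (p j : Nat) (v : Int) :
    (l.set p v).getD j 0 = if j = p ∧ p < l.length then v else l.getD j 0 := by
  induction l generalizing p j with
  | nil => simp [List.set]
  | cons x xs ih =>
    cases p with
    | zero => cases j <;> simp [List.set, List.getD]
    | succ p =>
      cases j with
      | zero => simp [List.set, List.getD]
      | succ j => simpa [List.set, List.getD] using ih p j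

-- setting a zero cell to a nonzero value decreases the zero count by one
lemma pvCount_set (l : List Int) (p : Nat) (v : Int) (hp : p < l.length)
    (h0 : l.getD p 0 = 0) (hv : v ≠ 0) : (l.set p v).count 0 = l.count 0 - 1 := by
  induction l generalizing p with
  | nil => simp at hp
  | cons x xs ih =>
    cases p with
    | zero =>
      rw [List.getD_cons_zero] at h0
      subst h0
      simp only [List.set]
      rw [List.count_cons, List.count_cons]
      simp [hv]
    | succ p =>
      simp only [List.length_cons] at hp
      rw [List.getD_cons_succ] at h0
      have hlt : p < xs.length := by omega
      simp only [List.set]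
      rw [List.count_cons, List.count_cons, ih p hlt h0]
      have hg : xs[p]? = some xs[p] := List.getElem?_eq_getElem hlt
      have h0'' : xs[p] = 0 := by
        rw [List.getD_eq_getElem?_getD, hg] at h0
        simpa using h0
      have hmem : (0 : Int) ∈ xs := h0'' ▸ List.getElem_mem hlt
      have : 1 ≤ xs.count 0 := List.count_pos_iff.mpr hmem
      omega

-- step component of the trajectory is pvS
lemma pvTraj_step (n : Int) (hn : 0 < n) (i : Nat) :
    (pvTraj n i).2 = ((pvS n.toNat i : Nat) : Int) := by
  induction i with
  | zero => simp [pvTraj, pvS]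
  | succ i ih =>
    show PySem.Int.mod ((pvTraj n i).2 + (i : Int) + 1) n = _
    rw [ih]
    have hcast : ((pvS n.toNat i : Nat) : Int) + (i : Int) + 1
        = ((pvS n.toNat i + i + 1 : Nat) : Int) := by push_cast; ring
    have hn' : n = ((n.toNat : Nat) : Int) := by omega
    rw [hcast, hn', PySem.Int.mod_natCast]
    rfl

lemma pvTraj_len (n : Int) (i : Nat) : (pvTraj n i).1.length = n.toNat := by
  induction i with
  | zero => simp [pvTraj]
  | succ i ih => simpa [pvTraj] using ih

-- the full invariant: entries are nonzero exactly at already-visited positions,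
-- and the number of zero cells is 2^k - i
lemma pvInv (k : Nat) (n : Int) (hn : n = ((2 ^ k : Nat) : Int)) :
    ∀ i, i ≤ 2 ^ k →
      (∀ j, j < 2 ^ k → ((pvTraj n i).1.getD j 0 = 0 ↔ ∀ l, l < i → pvS (2 ^ k) l ≠ j)) ∧
      (pvTraj n i).1.count 0 = 2 ^ k - i := by
  have hm : n.toNat = 2 ^ k := by have := Nat.two_pow_pos k; omega
  have hpos : (0:Int) < n := by
    rw [hn]; exact_mod_cast Nat.two_pow_pos k
  intro i
  induction i with
  | zero =>
    intro _
    constructor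
    · intro j hj
      simp [pvTraj, hm, hj]
    · simp [pvTraj, hm]
  | succ i ih =>
    intro hi1
    have hi : i < 2 ^ k := by omega
    obtain ⟨hchar, hcount⟩ := ih (by omega)
    have hlen : (pvTraj n i).1.length = 2 ^ k := by rw [pvTraj_len, hm]
    have hstep : (pvTraj n i).2 = ((pvS (2 ^ k) i : Nat) : Int) := by
      rw [pvTraj_step n hpos, hm]
    have hp : pvS (2 ^ k) i < 2 ^ k := pvS_lt _ _ (Nat.two_pow_pos k)
    have hz : (pvTraj n i).1.getD (pvS (2 ^ k) i) 0 = 0 := by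
      rw [hchar _ hp]
      intro l hl
      exact pvS_inj k l i hl hi
    have hset : (pvTraj n (i + 1)).1
        = (pvTraj n i).1.set (pvS (2 ^ k) i) ((i : Int) + 1) := by
      show (pvTraj n i).1.set (pvTraj n i).2.toNat ((i : Int) + 1) = _
      rw [hstep]; simp
    constructor
    · intro j hj
      rw [hset, pvGetD_set]
      by_cases hjp : j = pvS (2 ^ k) i
      · subst hjp
        rw [if_pos ⟨rfl, by rw [hlen]; exact hp⟩]
        constructor
        · intro habs; exfalso; omega
        · intro hall; exact absurd rfl (hall i (by omega))
      · rw [if_neg (by tauto), hchar _ hj]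
        constructor
        · intro hall l hl
          rcases Nat.lt_or_ge l i with h' | h'
          · exact hall l h'
          · have : l = i := by omega
            subst this; exact fun he => hjp he.symm
        · intro hall l hl; exact hall l (by omega)
    · rw [hset, pvCount_set _ _ _ (by rw [hlen]; exact hp) hz (by omega), hcount]
      omega

-- the written values: after i placements, the cell at pvS l holds l + 1 for every l < i
lemma pvVal (k : Nat) (n : Int) (hn : n = ((2 ^ k : Nat) : Int)) :
    ∀ i, i ≤ 2 ^ k → ∀ l, l < i →
      (pvTraj n i).1.getD (pvS (2 ^ k) l) 0 = (l : Int) + 1 := by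
  have hm : n.toNat = 2 ^ k := by have := Nat.two_pow_pos k; omega
  have hpos : (0:Int) < n := by
    rw [hn]; exact_mod_cast Nat.two_pow_pos k
  intro i
  induction i with
  | zero => intro _ l hl; omega
  | succ i ih =>
    intro hi1 l hl
    have hi : i < 2 ^ k := by omega
    have hstep : (pvTraj n i).2 = ((pvS (2 ^ k) i : Nat) : Int) := by
      rw [pvTraj_step n hpos, hm]
    have hp : pvS (2 ^ k) i < 2 ^ k := pvS_lt _ _ (Nat.two_pow_pos k)
    have hlen : (pvTraj n i).1.length = 2 ^ k := by rw [pvTraj_len, hm]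
    have hset : (pvTraj n (i + 1)).1
        = (pvTraj n i).1.set (pvS (2 ^ k) i) ((i : Int) + 1) := by
      show (pvTraj n i).1.set (pvTraj n i).2.toNat ((i : Int) + 1) = _
      rw [hstep]; simp
    rw [hset, pvGetD_set]
    rcases Nat.lt_or_ge l i with h' | h'
    · rw [if_neg (fun hc => pvS_inj k l i h' hi hc.1)]
      exact ih (by omega) l h'
    · have : l = i := by omega
      subst this
      rw [if_pos ⟨rfl, by rw [hlen]; exact hp⟩]

-- A's fuel loop follows the trajectory and stops exactly when the array is full
lemma pvLoopA_traj (k : Nat) (n : Int) (hn : n = ((2 ^ k : Nat) : Int)) :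
    ∀ f i, i + f = 2 ^ k →
      zapLoopA n f (pvTraj n i).1 (i : Int) (pvTraj n i).2 = (pvTraj n (2 ^ k)).1 := by
  have hpos : (0:Int) < n := by
    rw [hn]; exact_mod_cast Nat.two_pow_pos k
  have hm : n.toNat = 2 ^ k := by have := Nat.two_pow_pos k; omega
  intro f
  induction f with
  | zero =>
    intro i hif
    have : i = 2 ^ k := by omega
    subst this
    rfl
  | succ f ihf =>
    intro i hif
    have hi : i < 2 ^ k := by omega
    obtain ⟨hchar, hcount⟩ := pvInv k n hn i (by omega)
    have hcnt : (pvTraj n i).1.count 0 ≠ 0 := by omega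
    have hstep : (pvTraj n i).2 = ((pvS (2 ^ k) i : Nat) : Int) := by
      rw [pvTraj_step n hpos, hm]
    have hp : pvS (2 ^ k) i < 2 ^ k := pvS_lt _ _ (Nat.two_pow_pos k)
    have hlen : (pvTraj n i).1.length = 2 ^ k := by rw [pvTraj_len, hm]
    have hread :
        ((pvTraj n i).1.set (pvTraj n i).2.toNat ((i : Int) + 1)).getD
          (pvTraj n i).2.toNat 0 = (i : Int) + 1 := by
      rw [hstep]
      simp only [Int.toNat_natCast]
      rw [pvGetD_set]
      rw [if_pos ⟨rfl, by omega⟩]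
    show (if (pvTraj n i).1.count 0 ≠ 0 then
        zapLoopA n f ((pvTraj n i).1.set (pvTraj n i).2.toNat ((i : Int) + 1)) ((i : Int) + 1)
          (PySem.Int.mod ((pvTraj n i).2 +
            ((pvTraj n i).1.set (pvTraj n i).2.toNat ((i : Int) + 1)).getD (pvTraj n i).2.toNat 0) n)
      else (pvTraj n i).1) = (pvTraj n (2 ^ k)).1
    rw [if_pos hcnt, hread]
    have hassoc : (pvTraj n i).2 + ((i : Int) + 1) = (pvTraj n i).2 + (i : Int) + 1 := by ring
    rw [hassoc]
    have hgoal : zapLoopA n f (pvTraj n (i + 1)).1 (((i + 1 : Nat) : Int)) (pvTraj n (i + 1)).2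
        = (pvTraj n (2 ^ k)).1 := ihf (i + 1) (by omega)
    have hcast : ((i + 1 : Nat) : Int) = (i : Int) + 1 := by push_cast; ring
    rw [hcast] at hgoal
    exact hgoal

-- B's key expression, in Nat form: i*(i+1)//2 % n is exactly pvS
lemma pvKey_eq (m l : Nat) :
    PySem.Int.mod (PySem.Int.floordiv ((l : Int) * ((l : Int) + 1)) 2) ((m : Nat) : Int)
      = ((pvS m l : Nat) : Int) := by
  have h1 : (l : Int) * ((l : Int) + 1) = ((l * (l + 1) : Nat) : Int) := by push_cast; ring
  have h2 : ((2 : Nat) : Int) = (2 : Int) := by norm_num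
  rw [h1, ← h2, PySem.Int.floordiv_natCast, PySem.Int.mod_natCast]
  have h3 : l * (l + 1) / 2 = pvT l := by
    have := pvT_two l
    omega
  rw [h3, pvS_eq]

-- the dict built from the closed-form keys: lookup of pvS l gives l + 1 for every l < i
lemma pvDict_get (k : Nat) (n : Int) (hn : n = ((2 ^ k : Nat) : Int)) :
    ∀ i, i ≤ 2 ^ k → ∀ l, l < i →
      (pvDict n i).get? ((pvS (2 ^ k) l : Nat) : Int) = some ((l : Int) + 1) := by
  intro i
  induction i with
  | zero => intro _ l hl; omega
  | succ i ih =>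
    intro hi1 l hl
    have hi : i < 2 ^ k := by omega
    have hsplit : pvDict n (i + 1)
        = (pvDict n i).insert
            (PySem.Int.mod (PySem.Int.floordiv ((i : Int) * ((i : Int) + 1)) 2) n)
            ((i : Int) + 1) := by
      show (PySem.List.pyRange 0 ((i + 1 : Nat) : Int) 1).foldl _ _ = _
      have hcast : ((i + 1 : Nat) : Int) = (i : Int) + 1 := by push_cast; ring
      rw [hcast, PySem.List.pyRange_one_succ_right (by positivity), List.foldl_append]
      rfl
    have hkey : PySem.Int.mod (PySem.Int.floordiv ((i : Int) * ((i : Int) + 1)) 2) n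
        = ((pvS (2 ^ k) i : Nat) : Int) := by
      rw [hn]; exact pvKey_eq (2 ^ k) i
    rw [hsplit, hkey]
    rcases Nat.lt_or_ge l i with h' | h'
    · rw [PySem.Dict.get?_insert_of_ne]
      · exact ih (by omega) l h'
      · intro hc
        exact pvS_inj k l i h' hi (by exact_mod_cast hc)
    · have : l = i := by omega
      subst this
      rw [PySem.Dict.get?_insert_self]

-- the else branch: A's two comprehensions are B's two countdown ranges
lemma pvElse (n : Int) (heven : ¬ PySem.Int.mod n 2 = 1) :
    (PySem.List.pyRange 0 (PySem.Int.floordiv n 2) 1).map (fun i => n - 1 - i * 2)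
        ++ (PySem.List.pyRange 0 (PySem.Int.floordiv n 2) 1).map (fun i => n - i * 2)
      = PySem.List.pyRange (n - 1) 0 (-2) ++ PySem.List.pyRange n 0 (-2) := by
  have h2 : PySem.Int.mod n 2 = 0 := by
    have := PySem.Int.mod_nonneg n (by norm_num : (0:Int) < 2)
    have := PySem.Int.mod_lt n (by norm_num : (0:Int) < 2)
    omega
  obtain ⟨m, hm⟩ := (PySem.Int.mod_eq_zero_iff_dvd n 2).mp h2
  have hfd : PySem.Int.floordiv n 2 = m := by
    rw [PySem.Int.floordiv_eq_iff_of_pos (by norm_num)]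
    omega
  have hL1 : (PySem.List.pyRange 0 (PySem.Int.floordiv n 2) 1).map (fun i => n - 1 - i * 2)
      = (List.range m.toNat).map (fun k : Nat => n - 1 - (k : Int) * 2) := by
    rw [PySem.List.pyRange_one, hfd, List.map_map]
    simp only [Int.sub_zero]
    exact List.map_congr_left (fun x _ => by simp)
  have hL2 : (PySem.List.pyRange 0 (PySem.Int.floordiv n 2) 1).map (fun i => n - i * 2)
      = (List.range m.toNat).map (fun k : Nat => n - (k : Int) * 2) := by
    rw [PySem.List.pyRange_one, hfd, List.map_map]
    simp only [Int.sub_zero]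
    exact List.map_congr_left (fun x _ => by simp)
  have hR1 : PySem.List.pyRange (n - 1) 0 (-2)
      = (List.range m.toNat).map (fun k : Nat => n - 1 - (k : Int) * 2) := by
    unfold PySem.List.pyRange
    norm_num
    rw [show (if 1 < n then ((n - 1 + 2 - 1) / 2).toNat else 0) = m.toNat from by
      split_ifs with h <;> omega]
    exact List.map_congr_left (fun x _ => by ring)
  have hR2 : PySem.List.pyRange n 0 (-2)
      = (List.range m.toNat).map (fun k : Nat => n - (k : Int) * 2) := by
    unfold PySem.List.pyRange
    norm_num
    rw [show (if 0 < n then ((n + 2 - 1) / 2).toNat else 0) = m.toNat from by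
      split_ifs with h <;> omega]
    exact List.map_congr_left (fun x _ => by ring)
  rw [hL1, hL2, hR1, hR2]

-- ===== VERDICT (by name: the statement is the Claim_ definition above) =====
theorem zapbook_spec : Claim_equal_zapbook := by
  intro n _
  unfold Spec_zapbook zapbook zapbook_alt
  by_cases h1 : n = 1
  · simp [h1]
  · rw [if_neg h1, if_neg h1]
    by_cases h2 : PySem.Int.mod n 2 = 1
    · rw [if_pos h2, if_pos h2]
    · rw [if_neg h2, if_neg h2]
      by_cases hc : PySem.Int.band n (n - 1) = 0
      · rcases lt_trichotomy n 0 with hneg | hzero | hpos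
        · exfalso
          have := pvBand_neg_neg n (n - 1) hneg (by omega)
          omega
        · subst hzero; decide
        · rw [if_pos hc, if_pos ⟨hpos, hc⟩]
          have hb := PySem.Int.band_of_nonneg (by omega : (0:Int) ≤ n) (by omega : (0:Int) ≤ n - 1)
          rw [hb] at hc
          have hnat : n.toNat &&& (n - 1).toNat = 0 := by exact_mod_cast hc
          have hm1 : (n - 1).toNat = n.toNat - 1 := by omega
          rw [hm1] at hnat
          obtain ⟨k, hk⟩ := pvPow_of_land n.toNat (by omega) hnat
          have hn : n = ((2 ^ k : Nat) : Int) := by omega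
          have hA : zapLoopA n n.toNat (List.replicate n.toNat 0) 0 0
              = (pvTraj n (2 ^ k)).1 := by
            calc zapLoopA n n.toNat (List.replicate n.toNat 0) 0 0
                = zapLoopA n (2 ^ k) (pvTraj n 0).1 (((0 : Nat) : Int)) (pvTraj n 0).2 := by
                  rw [← hk]; rfl
              _ = (pvTraj n (2 ^ k)).1 := pvLoopA_traj k n hn (2 ^ k) 0 (by omega)
          rw [hA]
          -- elementwise comparison of A's array with B's dict readout
          apply List.ext_getElem
          · rw [pvTraj_len]
            simp [PySem.List.length_pyRange_one]
          · intro t h1t h2t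
            rw [pvTraj_len, hk] at h1t
            have hval := pvVal k n hn (2 ^ k) (le_refl _)
            obtain ⟨l, hlk, hls⟩ := pvS_surj k t h1t
            have hA_t : (pvTraj n (2 ^ k)).1[t] = (l : Int) + 1 := by
              have := hval l hlk
              rw [hls] at this
              rw [List.getD_eq_getElem?_getD, List.getElem?_eq_getElem
                (by rw [pvTraj_len]; omega)] at this
              simpa using this
            have hB_t :
                ((PySem.List.pyRange 0 n 1).map
                  (fun j => (((PySem.List.pyRange 0 n 1).foldl
                    (fun d i => d.insert
                      (PySem.Int.mod (PySem.Int.floordiv (i * (i + 1)) 2) n) (i + 1))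
                    PySem.Dict.empty).get? j).getD 0))[t]'h2t = (l : Int) + 1 := by
              rw [List.getElem_map]
              rw [PySem.List.getElem_pyRange_one]
              have hfold : (PySem.List.pyRange 0 n 1).foldl
                  (fun d i => d.insert
                    (PySem.Int.mod (PySem.Int.floordiv (i * (i + 1)) 2) n) (i + 1))
                  PySem.Dict.empty = pvDict n (2 ^ k) := by
                show _ = (PySem.List.pyRange 0 ((2 ^ k : Nat) : Int) 1).foldl _ _
                rw [← hn]
              rw [hfold]
              have hget := pvDict_get k n hn (2 ^ k) (le_refl _) l hlk
              rw [hls] at hget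
              have ht0 : (0 : Int) + (t : Int) = ((t : Nat) : Int) := by ring
              rw [ht0, hget]
              rfl
            rw [hA_t]
            exact hB_t.symm
      · rw [if_neg hc, if_neg (fun h => hc h.2)]
        exact pvElse n h2
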